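-- pv_equiv track=rewrite | github.com/adaruna3/explainable-kge | explainable_kge/models/explain_utils.py | get_non_repeats_front
-- ===== SOURCE A (Python) =====
-- def get_non_repeats_front(ent_list, num_corrupt=3, filter_ents=[]):
--     filter_names = [ent[:-2] for ent in filter_ents]
--     ent_list_filtered = [ent for ent in ent_list if ent[:-2] not in filter_names]
--     if len(ent_list_filtered) <= num_corrupt:
--         # remove repeats from small list (inefficiently)
--         i = 0
--         while i < len(ent_list_filtered):
--             j = i + 1
--             while j < len(ent_list_filtered):
--                 if ent_list_filtered[i][:-2] == ent_list_filtered[j][:-2]: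
--                     del ent_list_filtered[j]
--                 else:
--                     j += 1
--             i += 1
--         return ent_list_filtered
--     else:
--         # find 3 non-repeating ents (inefficiently)
--         ent_list_norepeat = [ent_list_filtered[0]]
--         i = 1
--         while len(ent_list_norepeat) < 3 and i < len(ent_list_filtered):
--             j = 0
--             skip = False
--             while j < len(ent_list_norepeat):
--                 if ent_list_norepeat[j][:-2] == ent_list_filtered[i][:-2]:
--                     i += 1
--                     skip = True
--                     break
--                 else:
--                     j += 1
--             if not skip:
--                 ent_list_norepeat.append(ent_list_filtered[i])
--                 i += 1
--         return ent_list_norepeat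
-- ===== SOURCE B (Python) =====
-- def get_non_repeats_front(ent_list, num_corrupt=3, filter_ents=[]):
--     filter_names = [ent[:-2] for ent in filter_ents]
--     ent_list_filtered = [ent for ent in ent_list if ent[:-2] not in filter_names]
--     # one order-preserving dedup by key ent[:-2], then branch once
--     seen = set()
--     unique = []
--     for ent in ent_list_filtered:
--         key = ent[:-2]
--         if key not in seen:
--             seen.add(key)
--             unique.append(ent)
--     if len(ent_list_filtered) <= num_corrupt:
--         return unique
--     else:
--         return unique[:3]
-- ===== Notes on version B (the rewrite author's own statement) =====
-- stated objective: simpler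
-- what changed: A's two separate dedup algorithms (an in-place O(n^2) del-loop for the small branch and a nested-scan first-3 collector for the large branch) are replaced by one order-preserving seen-set dedup pass over the filtered list followed by a single branch: the full deduped list, or its first 3 elements.
-- outside the precondition, e.g. on get_non_repeats_front([], -1, []): A raises IndexError, B returns []
import Mathlib
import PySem

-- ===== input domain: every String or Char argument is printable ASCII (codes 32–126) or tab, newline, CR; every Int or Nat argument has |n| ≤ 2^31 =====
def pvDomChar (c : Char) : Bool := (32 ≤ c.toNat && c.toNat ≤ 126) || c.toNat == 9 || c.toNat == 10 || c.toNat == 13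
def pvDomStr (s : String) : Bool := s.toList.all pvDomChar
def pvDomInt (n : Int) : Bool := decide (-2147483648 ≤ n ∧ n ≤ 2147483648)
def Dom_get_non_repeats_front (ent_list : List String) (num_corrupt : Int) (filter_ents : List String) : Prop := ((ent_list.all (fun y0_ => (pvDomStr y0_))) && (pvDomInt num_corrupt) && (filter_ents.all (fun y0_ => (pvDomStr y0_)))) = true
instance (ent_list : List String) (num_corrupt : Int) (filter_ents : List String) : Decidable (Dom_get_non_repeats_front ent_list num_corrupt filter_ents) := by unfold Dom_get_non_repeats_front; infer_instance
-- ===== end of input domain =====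

-- B replaces A's two separate nested-loop dedup algorithms with one seen-set dedup pass
-- followed by a single branch (full result vs first 3) — objective: simpler.
-- A mutates only its local filtered list, not its arguments.

-- ===== PORT A =====
-- shared key helper: ent[:-2]
def pvPref (s : String) : String := PySem.Str.slice s none (some (-2))

-- A's first while/while with `del`: keep element i, delete every later element with the same key
def pvDedupSmall : List String → List String
  | [] => []
  | x :: rest => x :: pvDedupSmall (rest.filter (fun e => !(pvPref x == pvPref e)))
termination_by l => l.length
decreasing_by simpa using List.length_filter_le _ rest.attach

-- A's second while: collect first 3 entities whose key is not yet in the accumulator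
def pvFront (acc : List String) : List String → List String
  | [] => acc
  | x :: rest =>
    if acc.length < 3 then
      if acc.any (fun y => pvPref y == pvPref x) then pvFront acc rest
      else pvFront (acc ++ [x]) rest
    else acc

def get_non_repeats_front (ent_list : List String) (num_corrupt : Int) (filter_ents : List String) : List String :=
  let filter_names := filter_ents.map pvPref
  let ent_list_filtered := ent_list.filter (fun ent => !(filter_names.contains (pvPref ent)))
  if (ent_list_filtered.length : Int) ≤ num_corrupt then
    pvDedupSmall ent_list_filtered
  else
    match ent_list_filtered with
    | [] => []  -- unreachable under Pre_: Python raises IndexError (ent_list_filtered[0]) here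
    | x :: rest => pvFront [x] rest

-- ===== PORT B =====
-- Source B's single dedup pass with a seen set of keys
def pvUniqueLoop (seen : PySem.Set String) (unique : List String) : List String → List String
  | [] => unique
  | ent :: rest =>
    let key := pvPref ent
    if PySem.Set.contains seen key then pvUniqueLoop seen unique rest
    else pvUniqueLoop (PySem.Set.add seen key) (unique ++ [ent]) rest

def get_non_repeats_front_alt (ent_list : List String) (num_corrupt : Int) (filter_ents : List String) : List String :=
  let filter_names := filter_ents.map pvPref
  let ent_list_filtered := ent_list.filter (fun ent => !(filter_names.contains (pvPref ent)))
  let unique := pvUniqueLoop PySem.Set.empty [] ent_list_filtered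
  if (ent_list_filtered.length : Int) ≤ num_corrupt then unique
  else unique.take 3

-- ===== PRECONDITION & SPEC =====
-- Pre_ excludes only the inputs where A raises IndexError: num_corrupt negative while every
-- entity of ent_list is filtered away (the filtered list is empty yet its length exceeds num_corrupt).
def Pre_get_non_repeats_front (ent_list : List String) (num_corrupt : Int) (filter_ents : List String) : Prop :=
  0 ≤ num_corrupt ∨ ∃ e ∈ ent_list, ¬ (pvPref e ∈ filter_ents.map pvPref)
instance (ent_list : List String) (num_corrupt : Int) (filter_ents : List String) : Decidable (Pre_get_non_repeats_front ent_list num_corrupt filter_ents) := by unfold Pre_get_non_repeats_front; infer_instance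

def pvWitness_get_non_repeats_front : List String × Int × List String := (["a_1", "a_2", "b_1"], 3, [])

def Spec_get_non_repeats_front (ent_list : List String) (num_corrupt : Int) (filter_ents : List String) (out : List String) : Prop := out = get_non_repeats_front_alt ent_list num_corrupt filter_ents
instance (ent_list : List String) (num_corrupt : Int) (filter_ents : List String) (out : List String) : Decidable (Spec_get_non_repeats_front ent_list num_corrupt filter_ents out) := by unfold Spec_get_non_repeats_front; infer_instance

-- ===== CLAIM (what is proved, stated in full; the proofs are below) =====
def Claim_equal_get_non_repeats_front : Prop := ∀ (ent_list : List String) (num_corrupt : Int) (filter_ents : List String), Dom_get_non_repeats_front ent_list num_corrupt filter_ents → Pre_get_non_repeats_front ent_list num_corrupt filter_ents → Spec_get_non_repeats_front ent_list num_corrupt filter_ents (get_non_repeats_front ent_list num_corrupt filter_ents)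
-- ===== LEMMAS AND PROOFS =====

-- a.any (pref · == pref x) coincides with key-list membership of pref x
lemma pv_beq_eq (a b : String) : (a == b) = decide (a = b) := by
  rw [Bool.eq_iff_iff]; simp

lemma pv_any_eq_contains (acc : List String) (x : String) :
    acc.any (fun y => pvPref y == pvPref x) = (acc.map pvPref).contains (pvPref x) := by
  rw [Bool.eq_iff_iff]
  simp only [List.any_eq_true, List.contains_iff_mem, List.mem_map, beq_iff_eq]

-- extending the seen set by one key = an extra filter by that key
lemma pv_filt_step (seen : List String) (k : String) (xs : List String) :
    xs.filter (fun e => !((seen ++ [k]).contains (pvPref e)))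
      = (xs.filter (fun e => !(seen.contains (pvPref e)))).filter (fun e => !(k == pvPref e)) := by
  rw [List.filter_filter]
  apply List.filter_congr
  intro e _
  simp [pv_beq_eq, eq_comm, Bool.and_comm]

-- B's single pass = A's small-list dedup of what the seen set has not yet excluded
lemma pv_uniqueLoop_eq (l : List String) : ∀ (seen acc : List String),
    pvUniqueLoop seen acc l
      = acc ++ pvDedupSmall (l.filter (fun e => !(seen.contains (pvPref e)))) := by
  induction l with
  | nil => intro seen acc; simp [pvUniqueLoop, pvDedupSmall]
  | cons x xs ih =>
    intro seen acc
    by_cases h : PySem.Set.contains seen (pvPref x) = true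
    · have hm : pvPref x ∈ seen := by simpa using h
      rw [show pvUniqueLoop seen acc (x :: xs) = pvUniqueLoop seen acc xs by
        simp only [pvUniqueLoop]; rw [if_pos h]]
      rw [ih, List.filter_cons, if_neg (by simp [hm])]
    · have hm : pvPref x ∉ seen := by simpa using h
      have hl : List.contains seen (pvPref x) = false := by simpa using h
      rw [show pvUniqueLoop seen acc (x :: xs)
          = pvUniqueLoop (PySem.Set.add seen (pvPref x)) (acc ++ [x]) xs by
        simp only [pvUniqueLoop]; rw [if_neg h]]
      rw [ih]
      have hadd : PySem.Set.add seen (pvPref x) = seen ++ [pvPref x] := by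
        simp [PySem.Set.add, hm]
      rw [hadd, pv_filt_step]
      have hd : pvDedupSmall (x :: xs.filter (fun e => !(seen.contains (pvPref e))))
          = x :: pvDedupSmall ((xs.filter (fun e => !(seen.contains (pvPref e)))).filter
              (fun e => !(pvPref x == pvPref e))) := by
        simp [pvDedupSmall]
      rw [List.filter_cons, if_pos (by simp [hm]), hd, List.append_assoc, List.cons_append,
        List.nil_append]

-- A's front-3 loop = take 3 of the dedup of the not-yet-seen part
lemma pv_front_eq (l : List String) : ∀ (acc : List String), acc.length ≤ 3 →
    pvFront acc l
      = (acc ++ pvDedupSmall (l.filter (fun e => !((acc.map pvPref).contains (pvPref e))))).take 3 := by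
  induction l with
  | nil => intro acc hacc; simp [pvFront, pvDedupSmall, List.take_of_length_le hacc]
  | cons x xs ih =>
    intro acc hacc
    by_cases h3 : acc.length < 3
    · by_cases hs : acc.any (fun y => pvPref y == pvPref x) = true
      · have hc : (acc.map pvPref).contains (pvPref x) = true := by
          rw [← pv_any_eq_contains]; exact hs
        have hm : pvPref x ∈ acc.map pvPref := by simpa using hc
        rw [show pvFront acc (x :: xs) = pvFront acc xs by simp [pvFront, h3, hs]]
        rw [ih acc hacc, List.filter_cons, if_neg (by simp [hm])]
      · have hc : (acc.map pvPref).contains (pvPref x) = false := by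
          rw [← pv_any_eq_contains]; simpa using hs
        have hm : pvPref x ∉ acc.map pvPref := by simpa using hc
        rw [show pvFront acc (x :: xs) = pvFront (acc ++ [x]) xs by
          simp [pvFront, h3, hs]]
        rw [ih (acc ++ [x]) (by simp; omega)]
        have hmap : (acc ++ [x]).map pvPref = acc.map pvPref ++ [pvPref x] := by simp
        rw [hmap, pv_filt_step]
        have hded : pvDedupSmall (x :: xs.filter (fun e => !((acc.map pvPref).contains (pvPref e))))
            = x :: pvDedupSmall ((xs.filter (fun e => !((acc.map pvPref).contains (pvPref e)))).filter
                (fun e => !(pvPref x == pvPref e))) := by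
          simp [pvDedupSmall]
        rw [List.filter_cons, if_pos (by simp [hm]), hded, List.append_assoc, List.cons_append,
          List.nil_append]
    · have h3' : acc.length = 3 := by omega
      rw [show pvFront acc (x :: xs) = acc by simp [pvFront, h3]]
      rw [← h3', List.take_left]

-- ===== VERDICT (by name: the statement is the Claim_ definition above) =====
theorem get_non_repeats_front_spec : Claim_equal_get_non_repeats_front := by
  intro ent_list num_corrupt filter_ents _ hpre
  unfold Spec_get_non_repeats_front get_non_repeats_front get_non_repeats_front_alt
  set fl := ent_list.filter (fun ent => !((filter_ents.map pvPref).contains (pvPref ent))) with hfl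
  by_cases h : (fl.length : Int) ≤ num_corrupt
  · rw [if_pos h, if_pos h, pv_uniqueLoop_eq]
    have : fl.filter (fun e => !(List.contains PySem.Set.empty (pvPref e))) = fl := by
      simp [PySem.Set.empty]
    rw [this, List.nil_append]
  · rw [if_neg h, if_neg h, ← hfl]
    have hne : fl ≠ [] := by
      rcases hpre with h0 | ⟨e, he, hnotin⟩
      · intro hnil; rw [hnil] at h; simp at h; omega
      · intro hnil
        have hmem : e ∈ fl := by
          rw [hfl, List.mem_filter]
          exact ⟨he, by simpa using hnotin⟩
        rw [hnil] at hmem; simp at hmem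
    obtain ⟨x, rest, hx⟩ := List.exists_cons_of_ne_nil hne
    rw [hx]
    show pvFront [x] rest = List.take 3 (pvUniqueLoop PySem.Set.empty [] (x :: rest))
    rw [pv_front_eq rest [x] (by simp), pv_uniqueLoop_eq]
    have h1 : (x :: rest).filter (fun e => !(List.contains PySem.Set.empty (pvPref e)))
        = x :: rest := by simp [PySem.Set.empty]
    rw [h1, List.nil_append]
    have h2 : pvDedupSmall (x :: rest)
        = x :: pvDedupSmall (rest.filter (fun e => !(pvPref x == pvPref e))) := by
      simp [pvDedupSmall]
    have h3 : rest.filter (fun e => !(([x].map pvPref).contains (pvPref e)))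
        = rest.filter (fun e => !(pvPref x == pvPref e)) := by
      apply List.filter_congr
      intro e _
      by_cases he : pvPref e = pvPref x
      · simp [he]
      · have hx' : pvPref x ≠ pvPref e := fun hh => he hh.symm
        simp [he, hx']
    rw [h2, h3, List.singleton_append]
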